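-- pv_equiv track=rewrite | github.com/BohdanPolulikh/Python-DQE-2022 | FourthLab_copyLab2.py | unite_all_numbers
-- ===== SOURCE A (Python) =====
-- def unite_all_numbers(lst_of_dicts: list):
--     """
--     Function is created to unite all keys and their according
--     values into one huge dictionary.
--     If there aren't key in some dictionaries - value '-1' will be
--     populated.
--     :param lst_of_dicts: this is the list of generated dictionaries
--     :return: dictionary with values that will be as
--     a list with numbers (e.g., 'b': [10, 5, -1, -1, 2])
--     """
--     all_numbers = dict()  # create empty dictionary
--     # find all unique keys from all dictionaries
--     all_keys = [x for d in lst_of_dicts for x in d.keys()]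
--     for i in all_keys:
--         # create corresponding empty list for each key
--         all_numbers[i] = list()
--     for dic in lst_of_dicts:
--         for key in all_numbers:
--             if key in dic:  # if key is in current dictionary
--                 # add value to list
--                 all_numbers[key].append(dic[key])
--             else:  # if key isn't in current dictionary
--                 # add -1 value to list
--                 all_numbers[key].append(-1)
--     return all_numbers  # return filled dictionary with list of values
-- ===== SOURCE B (Python) =====
-- def unite_all_numbers(lst_of_dicts: list):
--     n = len(lst_of_dicts)
--     result = dict()
--     # ordered unique keys, each mapped to a full row of -1 fillers
--     for d in lst_of_dicts:
--         for k in d: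
--             if k not in result:
--                 result[k] = [-1] * n
--     # scatter each present value into its positional slot
--     for i, d in enumerate(lst_of_dicts):
--         for k, v in d.items():
--             result[k][i] = v
--     return result
-- ===== Notes on version B (the rewrite author's own statement) =====
-- stated objective: alternative
-- what changed: Instead of A's dict-outer/key-inner pass that tests membership for every (dict, key) pair and appends value-or(-1), B pre-fills every key's row with n copies of -1 and then scatters only the values actually present into their positional slots (result[k][i] = v), removing the per-key membership branch.
import Mathlib
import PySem

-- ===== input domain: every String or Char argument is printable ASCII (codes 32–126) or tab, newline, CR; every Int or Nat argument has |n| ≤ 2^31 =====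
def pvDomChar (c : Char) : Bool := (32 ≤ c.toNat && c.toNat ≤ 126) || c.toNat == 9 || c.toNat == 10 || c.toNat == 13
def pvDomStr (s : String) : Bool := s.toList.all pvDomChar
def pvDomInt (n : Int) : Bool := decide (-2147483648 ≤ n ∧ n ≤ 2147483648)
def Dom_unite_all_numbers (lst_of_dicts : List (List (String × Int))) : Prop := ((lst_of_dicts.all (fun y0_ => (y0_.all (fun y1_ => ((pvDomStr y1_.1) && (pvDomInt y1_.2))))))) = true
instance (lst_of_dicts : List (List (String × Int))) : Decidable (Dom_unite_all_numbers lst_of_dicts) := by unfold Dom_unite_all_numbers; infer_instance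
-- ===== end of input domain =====

-- B re-implements A by pre-filling each key's row with -1 and scattering present values
-- into positional slots (alternative decomposition, same cost); return values proved equal.

-- ===== PORT A =====
-- all_numbers[i] = list()
def pvA_initStep (acc : PySem.Dict String (List Int)) (k : String) : PySem.Dict String (List Int) :=
  acc.insert k []

-- body of "for key in all_numbers": append dic[key] if present, else -1
def pvA_fillStep (dic : PySem.Dict String Int) (acc : PySem.Dict String (List Int))
    (key : String) : PySem.Dict String (List Int) :=
  if dic.contains key then acc.insert key (acc.getD key [] ++ [dic.getD key 0])
  else acc.insert key (acc.getD key [] ++ [-1])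

def unite_all_numbers (lst_of_dicts : List (List (String × Int))) : List (String × List Int) :=
  ((lst_of_dicts.foldl
      (fun nums dic => nums.keys.foldl (pvA_fillStep (PySem.Dict.ofList dic)) nums)
      ((lst_of_dicts.flatMap (fun d => (PySem.Dict.ofList d).keys)).foldl
        pvA_initStep PySem.Dict.empty))).items

-- ===== PORT B =====
-- body of "if k not in result: result[k] = [-1] * n"
def pvB_rowStep (n : Nat) (r : PySem.Dict String (List Int)) (k : String) :
    PySem.Dict String (List Int) :=
  if r.contains k then r else r.insert k (List.replicate n (-1))

-- body of "result[k][i] = v"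
def pvB_scatStep (i : Int) (r : PySem.Dict String (List Int)) (q : String × Int) :
    PySem.Dict String (List Int) :=
  r.insert q.1 (PySem.List.pySetD (r.getD q.1 []) i q.2)

def unite_all_numbers_alt (lst_of_dicts : List (List (String × Int))) : List (String × List Int) :=
  ((PySem.List.enumerate lst_of_dicts).foldl
      (fun r p => (PySem.Dict.ofList p.2).items.foldl (pvB_scatStep p.1) r)
      (lst_of_dicts.foldl
        (fun r d => (PySem.Dict.ofList d).keys.foldl (pvB_rowStep lst_of_dicts.length) r)
        PySem.Dict.empty)).items

-- ===== PRECONDITION & SPEC =====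
def Spec_unite_all_numbers (lst_of_dicts : List (List (String × Int))) (out : List (String × List Int)) : Prop := out = unite_all_numbers_alt lst_of_dicts
instance (lst_of_dicts : List (List (String × Int))) (out : List (String × List Int)) : Decidable (Spec_unite_all_numbers lst_of_dicts out) := by unfold Spec_unite_all_numbers; infer_instance

-- ===== CLAIM (what is proved, stated in full; the proofs are below) =====
def Claim_equal_unite_all_numbers : Prop := ∀ (lst_of_dicts : List (List (String × Int))), Dom_unite_all_numbers lst_of_dicts → Spec_unite_all_numbers lst_of_dicts (unite_all_numbers lst_of_dicts)

-- ===== LEMMAS AND PROOFS =====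

-- the value A records for key k at dictionary dic
def pvVal (d : PySem.Dict String Int) (k : String) : Int :=
  if d.contains k then d.getD k 0 else -1

lemma pvA_fillStep_eq (d : PySem.Dict String Int) :
    pvA_fillStep d = fun acc key => acc.insert key (acc.getD key [] ++ [pvVal d key]) := by
  funext acc key
  by_cases h : d.contains key <;> simp [pvA_fillStep, pvVal, h]

-- nested loop over sublists = one loop over the flattened list
lemma pv_foldl_flatMap {α β σ : Type} (l : List α) (g : α → List β) (f : σ → β → σ) (init : σ) :
    l.foldl (fun s a => (g a).foldl f s) init = (l.flatMap g).foldl f init := by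
  induction l generalizing init with
  | nil => rfl
  | cons a l ih => simp only [List.flatMap_cons, List.foldl_append, List.foldl_cons]; exact ih _

lemma pv_set_update_self (s t : List String) (h : ∀ x ∈ t, x ∈ s) :
    PySem.Set.update s t = s := by
  rw [PySem.Set.update_eq_append_filter]
  have hf : (PySem.Set.ofList t).filter (fun y => !(PySem.Set.contains s y)) = [] := by
    rw [List.filter_eq_nil_iff]
    intro a ha
    simpa using h a ((PySem.Set.mem_ofList t a).mp ha)
  rw [hf, List.append_nil]

lemma pv_initA_getD (ks : List String) (d : PySem.Dict String (List Int))
    (h : ∀ k, d.getD k [] = []) (k : String) :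
    (ks.foldl pvA_initStep d).getD k [] = [] := by
  induction ks generalizing d with
  | nil => exact h k
  | cons a ks ih =>
    refine ih _ (fun k' => ?_)
    rw [pvA_initStep, PySem.Dict.getD_insert]
    split
    · rfl
    · exact h k'

lemma pv_appendFold (K : List String) (w : String → Int) (r : PySem.Dict String (List Int))
    (hK : K.Nodup) (k : String) :
    (K.foldl (fun acc key => acc.insert key (acc.getD key [] ++ [w key])) r).getD k []
      = if k ∈ K then r.getD k [] ++ [w k] else r.getD k [] := by
  induction K generalizing r with
  | nil => simp
  | cons a K ih =>
    rw [List.foldl_cons, ih _ hK.of_cons]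
    by_cases hk : k ∈ K
    · have hka : k ≠ a := fun h => (List.nodup_cons.mp hK).1 (h ▸ hk)
      simp [hk, hka, PySem.Dict.getD_insert]
    · by_cases hka : k = a
      · subst hka
        simp [hk, PySem.Dict.getD_insert]
      · simp [hk, hka, PySem.Dict.getD_insert]

lemma pv_fillA (rest : List (List (String × Int))) :
    ∀ (r : PySem.Dict String (List Int)), r.keys.Nodup →
      ((rest.foldl (fun nums dic => nums.keys.foldl (pvA_fillStep (PySem.Dict.ofList dic)) nums) r).keys
          = r.keys ∧
       ∀ k, (rest.foldl (fun nums dic => nums.keys.foldl (pvA_fillStep (PySem.Dict.ofList dic)) nums) r).getD k []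
          = if k ∈ r.keys then r.getD k [] ++ rest.map (fun dic => pvVal (PySem.Dict.ofList dic) k)
            else r.getD k []) := by
  induction rest with
  | nil =>
    intro r _
    refine ⟨rfl, fun k => ?_⟩
    by_cases hk : k ∈ r.keys <;> simp [hk]
  | cons dic rest ih =>
    intro r hnd
    have hstep : r.keys.foldl (pvA_fillStep (PySem.Dict.ofList dic)) r
        = r.keys.foldl (fun acc key => acc.insert key (acc.getD key [] ++ [pvVal (PySem.Dict.ofList dic) key])) r := by
      rw [pvA_fillStep_eq]
    have hkeys' : (r.keys.foldl (pvA_fillStep (PySem.Dict.ofList dic)) r).keys = r.keys := by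
      rw [hstep, PySem.Dict.keys_foldl_insert]
      exact pv_set_update_self _ _ (fun x hx => hx)
    have hget' : ∀ k, (r.keys.foldl (pvA_fillStep (PySem.Dict.ofList dic)) r).getD k []
        = if k ∈ r.keys then r.getD k [] ++ [pvVal (PySem.Dict.ofList dic) k] else r.getD k [] := by
      intro k; rw [hstep]; exact pv_appendFold r.keys _ r hnd k
    obtain ⟨ihk, ihg⟩ := ih (r.keys.foldl (pvA_fillStep (PySem.Dict.ofList dic)) r) (by rw [hkeys']; exact hnd)
    constructor
    · rw [List.foldl_cons]; exact ihk.trans hkeys'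
    · intro k
      rw [List.foldl_cons, ihg k, hkeys', hget' k]
      by_cases hk : k ∈ r.keys <;> simp [hk]

lemma pv_rowFold (ks : List String) (n : Nat) :
    ∀ r : PySem.Dict String (List Int),
      ((ks.foldl (pvB_rowStep n) r).keys = PySem.Set.update r.keys ks) ∧
      ∀ k, (ks.foldl (pvB_rowStep n) r).getD k []
        = if k ∈ r.keys then r.getD k []
          else if k ∈ ks then List.replicate n (-1) else r.getD k [] := by
  induction ks with
  | nil =>
    intro r
    refine ⟨(PySem.Set.update_nil _).symm, fun k => ?_⟩
    by_cases hk : k ∈ r.keys <;> simp [hk]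
  | cons a ks ih =>
    intro r
    by_cases hc : r.contains a
    · have hmem : a ∈ r.keys := (PySem.Dict.contains_iff_mem_keys r a).mp hc
      have hca : pvB_rowStep n r a = r := by simp [pvB_rowStep, hc]
      obtain ⟨ihk, ihg⟩ := ih r
      constructor
      · rw [List.foldl_cons, hca, ihk, PySem.Set.update_cons, PySem.Set.add_of_mem hmem]
      · intro k
        rw [List.foldl_cons, hca, ihg k]
        by_cases hk : k ∈ r.keys
        · simp [hk]
        · have hka : k ≠ a := fun h => hk (h ▸ hmem)
          simp [hk, hka]
    · have hcf : r.contains a = false := by simpa using hc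
      have hmem : a ∉ r.keys := fun h => hc ((PySem.Dict.contains_iff_mem_keys r a).mpr h)
      have hca : pvB_rowStep n r a = r.insert a (List.replicate n (-1)) := by
        simp [pvB_rowStep, hcf]
      have hkeys : (r.insert a (List.replicate n (-1))).keys = r.keys ++ [a] :=
        PySem.Dict.keys_insert_of_not_contains r _ hcf
      obtain ⟨ihk, ihg⟩ := ih (r.insert a (List.replicate n (-1)))
      constructor
      · rw [List.foldl_cons, hca, ihk, hkeys, PySem.Set.update_cons,
            PySem.Set.add_of_not_mem hmem]
      · intro k
        rw [List.foldl_cons, hca, ihg k, hkeys]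
        by_cases hka : k = a
        · subst hka
          simp [hmem]
        · by_cases hk : k ∈ r.keys <;>
            simp [hk, hka, PySem.Dict.getD_insert]

lemma pv_lookup_eq_none {β : Type} (its : List (String × β)) (k : String)
    (h : k ∉ its.map Prod.fst) : its.lookup k = none := by
  induction its with
  | nil => rfl
  | cons a t ih =>
    obtain ⟨a1, v⟩ := a
    simp only [List.map_cons, List.mem_cons, not_or] at h
    have hb : (k == a1) = false := beq_eq_false_iff_ne.mpr h.1
    simp [List.lookup, hb, ih h.2]

lemma pv_get?_eq_lookup (d : PySem.Dict String Int) (k : String) :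
    d.get? k = d.items.lookup k := by
  obtain ⟨its⟩ := d
  induction its with
  | nil => rfl
  | cons a t ih =>
    obtain ⟨a1, v⟩ := a
    rw [PySem.Dict.get?_mk_cons]
    by_cases h : a1 = k
    · subst h; simp [List.lookup]
    · have h1 : (a1 == k) = false := beq_eq_false_iff_ne.mpr h
      have h2 : (k == a1) = false := beq_eq_false_iff_ne.mpr (Ne.symm h)
      simp [List.lookup, h1, h2, ih]

lemma pv_scatL (its : List (String × Int)) (i : Int) :
    ∀ (r : PySem.Dict String (List Int)), (its.map Prod.fst).Nodup → ∀ k,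
      (its.foldl (pvB_scatStep i) r).getD k []
        = match its.lookup k with
          | some v => PySem.List.pySetD (r.getD k []) i v
          | none => r.getD k [] := by
  induction its with
  | nil => intro r _ k; rfl
  | cons a t ih =>
    intro r hn k
    obtain ⟨a1, v⟩ := a
    simp only [List.map_cons] at hn
    rw [List.foldl_cons]
    rw [ih _ hn.of_cons k]
    by_cases hk : k = a1
    · subst hk
      have hl : t.lookup k = none := pv_lookup_eq_none t k (List.nodup_cons.mp hn).1
      simp [hl, List.lookup, pvB_scatStep]
    · have hb : (k == a1) = false := beq_eq_false_iff_ne.mpr hk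
      have : (pvB_scatStep i r (a1, v)).getD k [] = r.getD k [] := by
        simp [pvB_scatStep, PySem.Dict.getD_insert, hk]
      simp [List.lookup, hb, this]

lemma pv_scatOuter (rest : List (List (String × Int))) :
    ∀ (s : Int) (r : PySem.Dict String (List Int)),
      (∀ dic ∈ rest, ∀ x ∈ (PySem.Dict.ofList dic).keys, x ∈ r.keys) →
      (((PySem.List.enumerate rest s).foldl
          (fun r p => (PySem.Dict.ofList p.2).items.foldl (pvB_scatStep p.1) r) r).keys = r.keys ∧
       ∀ k, ((PySem.List.enumerate rest s).foldl
          (fun r p => (PySem.Dict.ofList p.2).items.foldl (pvB_scatStep p.1) r) r).getD k []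
        = (PySem.List.enumerate rest s).foldl
            (fun cur p => match (PySem.Dict.ofList p.2).get? k with
              | some v => PySem.List.pySetD cur p.1 v
              | none => cur) (r.getD k [])) := by
  induction rest with
  | nil => intro s r _; exact ⟨rfl, fun k => rfl⟩
  | cons d rest ih =>
    intro s r hsub
    have hnk : ((PySem.Dict.ofList d).items.map Prod.fst).Nodup := by
      have := PySem.Dict.nodup_keys_ofList (ps := d) (κ := String) (ν := Int)
      simpa [PySem.Dict.keys] using this
    have hk' : ((PySem.Dict.ofList d).items.foldl (pvB_scatStep s) r).keys = r.keys := by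
      have hsh : (PySem.Dict.ofList d).items.foldl (pvB_scatStep s) r
          = (PySem.Dict.ofList d).items.foldl
              (fun r q => r.insert q.1 (PySem.List.pySetD (r.getD q.1 []) s q.2)) r := rfl
      rw [hsh, PySem.Dict.keys_foldl_insert_key]
      refine pv_set_update_self _ _ (fun x hx => ?_)
      exact hsub d (List.mem_cons_self) x (by simpa [PySem.Dict.keys] using hx)
    have hg' : ∀ k, ((PySem.Dict.ofList d).items.foldl (pvB_scatStep s) r).getD k []
        = match (PySem.Dict.ofList d).get? k with
          | some v => PySem.List.pySetD (r.getD k []) s v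
          | none => r.getD k [] := by
      intro k
      rw [pv_get?_eq_lookup]
      exact pv_scatL _ s r hnk k
    obtain ⟨ihk, ihg⟩ := ih (s + 1) ((PySem.Dict.ofList d).items.foldl (pvB_scatStep s) r)
      (by intro dic hd x hx; rw [hk']; exact hsub dic (List.mem_cons_of_mem _ hd) x hx)
    constructor
    · rw [PySem.List.enumerate_cons, List.foldl_cons]
      exact ihk.trans hk'
    · intro k
      rw [PySem.List.enumerate_cons, List.foldl_cons, List.foldl_cons, ihg k, hg' k]

lemma pv_set_at {l1 : List Int} {x : Int} {l2 : List Int} {v : Int} {s : Nat}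
    (h : l1.length = s) : (l1 ++ x :: l2).set s v = l1 ++ v :: l2 := by
  subst h
  induction l1 with
  | nil => rfl
  | cons a t ih => simp [ih]

lemma pv_drop_at {l1 : List Int} {x : Int} {l2 : List Int} {s : Nat}
    (h : l1.length = s) : (l1 ++ x :: l2).drop (s + 1) = l2 := by
  subst h
  induction l1 with
  | nil => rfl
  | cons a t ih => simp [ih]

lemma pv_take_at {l1 : List Int} {x : Int} {l2 : List Int} {s : Nat}
    (h : l1.length = s) : (l1 ++ x :: l2).take (s + 1) = l1 ++ [x] := by
  subst h
  induction l1 with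
  | nil => rfl
  | cons a t ih => simp [ih]

lemma pv_scatterVal (k : String) (rest : List (List (String × Int))) :
    ∀ (s : Nat) (base : List Int), base.drop s = List.replicate rest.length (-1) →
      (PySem.List.enumerate rest (s : Int)).foldl
        (fun cur p => match (PySem.Dict.ofList p.2).get? k with
          | some v => PySem.List.pySetD cur p.1 v
          | none => cur) base
      = base.take s ++ rest.map (fun dic => pvVal (PySem.Dict.ofList dic) k) := by
  induction rest with
  | nil =>
    intro s base h
    simp only [List.length_nil, List.replicate_zero] at h
    simp [PySem.List.enumerate_nil, List.take_of_length_le (List.drop_eq_nil_iff.mp h)]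
  | cons d rest ih =>
    intro s base h
    have hlen : s < base.length := by
      have := congrArg List.length h
      simp only [List.length_drop, List.length_replicate, List.length_cons] at this
      omega
    have hts : (base.take s).length = s := by
      simp [List.length_take, Nat.min_eq_left (le_of_lt hlen)]
    have hb : base = base.take s ++ (-1) :: List.replicate rest.length (-1) := by
      conv_lhs => rw [← List.take_append_drop s base, h]
      simp [List.replicate_succ]
    rw [PySem.List.enumerate_cons, List.foldl_cons]
    have hstep : (match (PySem.Dict.ofList d).get? k with
          | some v => PySem.List.pySetD base ((s : Nat) : Int) v
          | none => base)
        = base.take s ++ pvVal (PySem.Dict.ofList d) k :: List.replicate rest.length (-1) := by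
      cases hq : (PySem.Dict.ofList d).get? k with
      | none =>
        have hcf : (PySem.Dict.ofList d).contains k = false := by
          rw [PySem.Dict.contains_eq_isSome_get?, hq]; rfl
        simpa [pvVal, hcf] using hb
      | some v =>
        have hct : (PySem.Dict.ofList d).contains k = true := by
          rw [PySem.Dict.contains_eq_isSome_get?, hq]; rfl
        have hgv : (PySem.Dict.ofList d).getD k 0 = v := PySem.Dict.getD_of_get?_eq_some _ 0 hq
        show PySem.List.pySetD base ((s : Nat) : Int) v = _
        rw [PySem.List.pySetD_natCast]
        conv_lhs => rw [hb]
        rw [pv_set_at hts]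
        simp [pvVal, hct, hgv]
    rw [hstep]
    have h' : (base.take s ++ pvVal (PySem.Dict.ofList d) k :: List.replicate rest.length (-1)).drop (s + 1)
        = List.replicate rest.length (-1) := by
      exact pv_drop_at hts
    have hcast : ((s : Int) + 1) = (((s + 1 : Nat)) : Int) := by push_cast; ring
    rw [hcast, ih (s + 1) _ h']
    rw [pv_take_at hts]
    simp

theorem pv_main (l : List (List (String × Int))) :
    unite_all_numbers l = unite_all_numbers_alt l := by
  have hndK : (PySem.Set.ofList (l.flatMap (fun d => (PySem.Dict.ofList d).keys))).Nodup :=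
    PySem.Set.nodup_ofList _
  -- A side
  have hA0keys : ((l.flatMap (fun d => (PySem.Dict.ofList d).keys)).foldl
      pvA_initStep PySem.Dict.empty).keys
      = PySem.Set.ofList (l.flatMap (fun d => (PySem.Dict.ofList d).keys)) := by
    have hsh : (l.flatMap (fun d => (PySem.Dict.ofList d).keys)).foldl pvA_initStep PySem.Dict.empty
        = (l.flatMap (fun d => (PySem.Dict.ofList d).keys)).foldl
            (fun acc k => acc.insert k ([] : List Int)) PySem.Dict.empty := rfl
    rw [hsh, PySem.Dict.keys_foldl_insert, PySem.Dict.keys_empty, PySem.Set.update_nil_left]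
  have hA0g : ∀ k, ((l.flatMap (fun d => (PySem.Dict.ofList d).keys)).foldl
      pvA_initStep PySem.Dict.empty).getD k [] = [] :=
    fun k => pv_initA_getD _ _ (fun k' => by simp [PySem.Dict.getD_empty]) k
  obtain ⟨hAk, hAg⟩ := pv_fillA l
    ((l.flatMap (fun d => (PySem.Dict.ofList d).keys)).foldl pvA_initStep PySem.Dict.empty)
    (by rw [hA0keys]; exact hndK)
  -- B side: flatten the row-building loop
  have hB0flat : l.foldl
      (fun r d => (PySem.Dict.ofList d).keys.foldl (pvB_rowStep l.length) r) PySem.Dict.empty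
      = (l.flatMap (fun d => (PySem.Dict.ofList d).keys)).foldl (pvB_rowStep l.length)
          PySem.Dict.empty :=
    pv_foldl_flatMap l _ _ _
  obtain ⟨hBk0, hBg0⟩ := pv_rowFold (l.flatMap (fun d => (PySem.Dict.ofList d).keys))
    l.length PySem.Dict.empty
  have hB0keys : (l.foldl
      (fun r d => (PySem.Dict.ofList d).keys.foldl (pvB_rowStep l.length) r) PySem.Dict.empty).keys
      = PySem.Set.ofList (l.flatMap (fun d => (PySem.Dict.ofList d).keys)) := by
    rw [hB0flat, hBk0, PySem.Dict.keys_empty, PySem.Set.update_nil_left]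
  have hB0g : ∀ k, k ∈ l.flatMap (fun d => (PySem.Dict.ofList d).keys) →
      (l.foldl (fun r d => (PySem.Dict.ofList d).keys.foldl (pvB_rowStep l.length) r)
        PySem.Dict.empty).getD k [] = List.replicate l.length (-1) := by
    intro k hk
    rw [hB0flat, hBg0 k]
    simp [PySem.Dict.keys_empty, hk]
  obtain ⟨hBkf, hBgf⟩ := pv_scatOuter l 0
    (l.foldl (fun r d => (PySem.Dict.ofList d).keys.foldl (pvB_rowStep l.length) r)
      PySem.Dict.empty)
    (by
      intro dic hd x hx
      rw [hB0keys]
      exact (PySem.Set.mem_ofList _ _).mpr (List.mem_flatMap.mpr ⟨dic, hd, hx⟩))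
  -- items of both sides
  unfold unite_all_numbers unite_all_numbers_alt
  rw [PySem.Dict.items_eq_map_keys _ (by rw [hAk, hA0keys]; exact hndK) ([] : List Int),
      PySem.Dict.items_eq_map_keys _ (by rw [hBkf, hB0keys]; exact hndK) ([] : List Int),
      hAk, hA0keys, hBkf, hB0keys]
  apply List.map_congr_left
  intro k hk
  have hkall : k ∈ l.flatMap (fun d => (PySem.Dict.ofList d).keys) := (PySem.Set.mem_ofList _ _).mp hk
  rw [hAg k, hBgf k, hB0g k hkall]
  rw [hA0keys]
  rw [show ((0 : Int)) = ((0 : Nat) : Int) from rfl, pv_scatterVal k l 0 _ (by simp)]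
  simp [hk, hA0g k]

-- ===== VERDICT (by name: the statement is the Claim_ definition above) =====
theorem unite_all_numbers_spec : Claim_equal_unite_all_numbers := by
  intro l _
  unfold Spec_unite_all_numbers
  exact pv_main l
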